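-- pv_equiv track=rewrite | github.com/Cobord/Vinci4d | tree_enumeration/beyer_hedetniemi.py | next_rooted_tree
-- ===== SOURCE A (Python) =====
-- from copy import copy
-- from typing import Callable, List, Optional
--
-- def last_not_level_one(level_sequence: List[int]) -> Optional[int]:
--     """
--     Look for index with value which is not 1
--     because this is a level sequence by assumption level_sequence[0] = 0
--     """
--     p = len(level_sequence) - 1
--     while level_sequence[p] == 1:
--         if p == 0:
--             break
--         p -= 1
--     if p == 0:
--         return None
--     return p
--
-- def next_rooted_tree(previous_level_sequence: List[int]):
--     """
--     One iteration to produce the next level sequence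
--     of another canonical tree with the same node count
--     """
--
--     p = last_not_level_one(previous_level_sequence)
--     if p is None:
--         return None
--
--     q = p - 1
--     while previous_level_sequence[q] != previous_level_sequence[p] - 1:
--         q -= 1
--     next_level_sequence = copy(previous_level_sequence)
--     for i in range(p, len(next_level_sequence)):
--         next_level_sequence[i] = next_level_sequence[i - p + q]
--     return next_level_sequence
-- ===== SOURCE B (Python) =====
-- def next_rooted_tree(previous_level_sequence):
--     prev = previous_level_sequence
--     last_at_level = {}
--     pq = None
--     for i, v in enumerate(prev):
--         if i > 0 and v != 1:
--             pq = (i, last_at_level.get(v - 1))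
--         last_at_level[v] = i
--     if pq is None:
--         return None
--     p, q = pq
--     d = p - q
--     return [prev[i] if i < p else prev[q + (i - p) % d] for i in range(len(prev))]
-- ===== Notes on version B (the rewrite author's own statement) =====
-- stated objective: alternative
-- what changed: B replaces A's two backward index scans and its copy-then-self-referential in-place fill by a single forward pass that maintains a last-index-per-level dictionary (so p and its matching q fall out of one traversal with no inner scan) and then builds the result as one fresh comprehension indexing the original list with modular arithmetic instead of reading back its own writes.
-- outside the precondition, e.g. on next_rooted_tree([3, 2, 1]): A returns [3, 1, 3], B raises TypeError
import Mathlib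
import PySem

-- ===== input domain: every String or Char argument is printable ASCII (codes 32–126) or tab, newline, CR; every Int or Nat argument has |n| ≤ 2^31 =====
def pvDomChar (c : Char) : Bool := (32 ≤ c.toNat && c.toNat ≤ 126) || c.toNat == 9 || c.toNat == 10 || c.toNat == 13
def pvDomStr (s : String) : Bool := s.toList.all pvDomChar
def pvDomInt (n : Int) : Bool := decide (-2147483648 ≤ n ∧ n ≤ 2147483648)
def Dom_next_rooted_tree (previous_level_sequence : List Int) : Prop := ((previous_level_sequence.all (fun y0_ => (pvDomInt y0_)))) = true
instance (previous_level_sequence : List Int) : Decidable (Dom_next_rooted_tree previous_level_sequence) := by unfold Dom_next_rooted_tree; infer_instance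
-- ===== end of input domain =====

-- B replaces A's two backward scans and self-referential in-place fill by one forward pass with a
-- last-index-per-level dictionary plus a fresh modular-indexing comprehension: alternative, not faster.


-- ===== PORT A =====
-- helper last_not_level_one: the Python while loop 'while ls[p] == 1: if p == 0: break; p -= 1',
-- started at p = len-1; structural recursion on p. In-range indexing ls[p] is ls.getD p 0 (exact
-- for every nonempty list; the empty list, where Python raises IndexError, is outside Pre_).
def pvLNLOLoop (ls : List Int) : Nat → Nat
  | 0 => 0
  | p + 1 => if ls.getD (p + 1) 0 = 1 then pvLNLOLoop ls p else p + 1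

def last_not_level_one (ls : List Int) : Option Nat :=
  let p := pvLNLOLoop ls (ls.length - 1)
  if p = 0 then none else some p

-- the 'while previous_level_sequence[q] != previous_level_sequence[p] - 1: q -= 1' loop;
-- q may go negative (Python wraps, then raises below -len): pyGet? is exact, fuel covers the
-- whole scanned range, none = the IndexError Python ends in (outside Pre_).
def pvQLoop (ls : List Int) (target : Int) : Nat → Int → Option Int
  | 0, _ => none
  | fuel + 1, q =>
      match PySem.List.pyGet? ls q with
      | none => none
      | some v => if v = target then some q else pvQLoop ls target fuel (q - 1)

-- 'for i in range(p, len(next_level_sequence)): next_level_sequence[i] = next_level_sequence[i - p + q]'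
def pvFill (ls : List Int) (p q : Int) : Option (List Int) :=
  (PySem.List.pyRange p (ls.length : Int) 1).foldl
    (fun acc? i =>
      match acc? with
      | none => none
      | some acc =>
          match PySem.List.pyGet? acc (i - p + q) with
          | none => none
          | some v => PySem.List.pySet? acc i v)
    (some ls)

def next_rooted_tree (previous_level_sequence : List Int) : Option (List Int) :=
  match last_not_level_one previous_level_sequence with
  | none => none
  | some p =>
      match pvQLoop previous_level_sequence
              (previous_level_sequence.getD p 0 - 1)
              (previous_level_sequence.length + p + 1) ((p : Int) - 1) with
      | none => none
      | some q => pvFill previous_level_sequence (p : Int) q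

-- ===== PORT B =====
-- one step of B's forward loop: st = (last_at_level dict, pq); iv = (i, v) from enumerate.
-- pq is computed from the dict BEFORE last_at_level[v] = i, as in the Python.
def pvBStep (st : PySem.Dict Int Int × Option (Int × Option Int)) (iv : Int × Int) :
    PySem.Dict Int Int × Option (Int × Option Int) :=
  (st.1.insert iv.2 iv.1,
   if 0 < iv.1 ∧ iv.2 ≠ 1 then some (iv.1, st.1.get? (iv.2 - 1)) else st.2)

def next_rooted_tree_alt (previous_level_sequence : List Int) : Option (List Int) :=
  let ls := previous_level_sequence
  let r := (PySem.List.enumerate ls).foldl pvBStep (PySem.Dict.empty, none)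
  match r.2 with
  | none => none
  | some (_, none) => none   -- q is None: the Python raises TypeError here; outside Pre_
  | some (p, some q) =>
      let d := p - q
      some ((PySem.List.pyRange 0 (ls.length : Int) 1).map
        (fun i => if i < p then PySem.List.pyGetD ls i 0
                  else PySem.List.pyGetD ls (q + PySem.Int.mod (i - p) d) 0))

-- ===== PRECONDITION & SPEC =====
-- Pre_ excludes (a) the empty list, where A raises IndexError, and (b) inputs whose backward
-- search for previous_level_sequence[p]-1 finds no index below p, where A either raises
-- IndexError or returns an accidental wraparound value via negative indexing while B raises
-- TypeError (its dictionary lookup yields None).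
def Pre_next_rooted_tree (previous_level_sequence : List Int) : Prop :=
  previous_level_sequence ≠ [] ∧
  ∀ p < previous_level_sequence.length, 0 < p → previous_level_sequence.getD p 0 ≠ 1 →
    (∀ j < previous_level_sequence.length, p < j → previous_level_sequence.getD j 0 = 1) →
    ∃ q < p, previous_level_sequence.getD q 0 = previous_level_sequence.getD p 0 - 1
instance (previous_level_sequence : List Int) : Decidable (Pre_next_rooted_tree previous_level_sequence) := by
  unfold Pre_next_rooted_tree; infer_instance

def pvWitness_next_rooted_tree : List Int := [0, 1, 2, 2, 1]

def Spec_next_rooted_tree (previous_level_sequence : List Int) (out : Option (List Int)) : Prop := out = next_rooted_tree_alt previous_level_sequence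
instance (previous_level_sequence : List Int) (out : Option (List Int)) : Decidable (Spec_next_rooted_tree previous_level_sequence out) := by unfold Spec_next_rooted_tree; infer_instance

-- ===== CLAIM (what is proved, stated in full; the proofs are below) =====
def Claim_equal_next_rooted_tree : Prop := ∀ (previous_level_sequence : List Int), Dom_next_rooted_tree previous_level_sequence → Pre_next_rooted_tree previous_level_sequence → Spec_next_rooted_tree previous_level_sequence (next_rooted_tree previous_level_sequence)

-- ===== LEMMAS AND PROOFS =====

theorem lnlo_le (ls : List Int) (p : Nat) : pvLNLOLoop ls p ≤ p := by
  induction p with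
  | zero => simp [pvLNLOLoop]
  | succ k ih => simp only [pvLNLOLoop]; split <;> omega

theorem lnlo_ne_one (ls : List Int) (p : Nat) (h : pvLNLOLoop ls p ≠ 0) :
    ls.getD (pvLNLOLoop ls p) 0 ≠ 1 := by
  induction p with
  | zero => simp [pvLNLOLoop] at h
  | succ k ih =>
    by_cases h1 : ls.getD (k + 1) 0 = 1
    · simp only [pvLNLOLoop, if_pos h1] at h ⊢; exact ih h
    · simp only [pvLNLOLoop, if_neg h1]; exact h1

theorem lnlo_ones (ls : List Int) (p : Nat) :
    ∀ j, pvLNLOLoop ls p < j → j ≤ p → ls.getD j 0 = 1 := by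
  induction p with
  | zero => intro j h1 h2; omega
  | succ k ih =>
    intro j h1 h2
    by_cases h1' : ls.getD (k + 1) 0 = 1
    · simp only [pvLNLOLoop, if_pos h1'] at h1
      rcases Nat.lt_or_ge j (k + 1) with hj | hj
      · exact ih j h1 (by omega)
      · have : j = k + 1 := by omega
        simpa [this] using h1'
    · simp only [pvLNLOLoop, if_neg h1'] at h1
      omega

theorem qloop_eq (ls : List Int) (t : Int) : ∀ k fuel : Nat, k < fuel → k < ls.length →
    (∃ q, q ≤ k ∧ ls.getD q 0 = t) →
    pvQLoop ls t fuel (k : Int)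
      = some ((Nat.findGreatest (fun q => ls.getD q 0 = t) k : Nat) : Int) := by
  intro k
  induction k with
  | zero =>
    intro fuel hf hl hex
    obtain ⟨f, rfl⟩ : ∃ f, fuel = f + 1 := ⟨fuel - 1, by omega⟩
    obtain ⟨q, hq, hP⟩ := hex
    interval_cases q
    have hP' : ls[0] = t := by rw [← List.getD_eq_getElem ls 0 hl]; exact hP
    cases ls with
    | nil => simp at hl
    | cons a l =>
      have ha : a = t := hP'
      simp [pvQLoop, PySem.List.pyGet?, PySem.List.pyIdx?, ha]
  | succ k ih =>
    intro fuel hf hk hex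
    obtain ⟨f, rfl⟩ : ∃ f, fuel = f + 1 := ⟨fuel - 1, by omega⟩
    simp only [pvQLoop, PySem.List.pyGet?_natCast, List.getElem?_eq_getElem hk]
    rw [Nat.findGreatest_succ]
    by_cases hg : ls.getD (k + 1) 0 = t
    · have hP : ls[k + 1] = t := by rw [← List.getD_eq_getElem ls _ hk]; exact hg
      rw [if_pos hP, if_pos hg]
    · have hP : ¬ ls[k + 1] = t := by rw [← List.getD_eq_getElem ls _ hk]; exact hg
      have hc : ((k + 1 : Nat) : Int) - 1 = (k : Int) := by push_cast; ring
      have hex' : ∃ q, q ≤ k ∧ ls.getD q 0 = t := by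
        obtain ⟨q, hq, hPq⟩ := hex
        refine ⟨q, ?_, hPq⟩
        by_contra hc2
        have hqe : q = k + 1 := by omega
        rw [hqe] at hPq
        exact hg hPq
      simp only [if_neg hP, if_neg hg, hc, ih f (by omega) (by omega) hex']

-- spec form of the dict after m steps: last index j < m with ls[j] = t, as B's dict stores it
def pvLastIdx? (ls : List Int) : Nat → Int → Option Int
  | 0, _ => none
  | m + 1, t => if ls.getD m 0 = t then some (m : Int) else pvLastIdx? ls m t

-- spec form of pq after m steps
def pvPQ (ls : List Int) : Nat → Option (Int × Option Int)
  | 0 => none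
  | m + 1 => if 0 < m ∧ ls.getD m 0 ≠ 1
             then some ((m : Int), pvLastIdx? ls m (ls.getD m 0 - 1))
             else pvPQ ls m

theorem bfold_spec (ls : List Int) : ∀ m, m ≤ ls.length →
    ((PySem.List.enumerate (ls.take m)).foldl pvBStep (PySem.Dict.empty, none)).2 = pvPQ ls m
    ∧ ∀ t, ((PySem.List.enumerate (ls.take m)).foldl pvBStep (PySem.Dict.empty, none)).1.get? t
        = pvLastIdx? ls m t := by
  intro m
  induction m with
  | zero =>
    intro _
    simp [PySem.List.enumerate_nil, pvPQ, pvLastIdx?, PySem.Dict.get?_empty]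
  | succ m ih =>
    intro h
    have hm : m < ls.length := by omega
    obtain ⟨ih2, ih1⟩ := ih (by omega)
    have htk : ls.take (m + 1) = ls.take m ++ [ls[m]] := by
      rw [List.take_succ, List.getElem?_eq_getElem hm]; rfl
    have hlen : (ls.take m).length = m := by simp [List.length_take]; omega
    rw [htk, PySem.List.enumerate_append, hlen, List.foldl_append]
    simp only [PySem.List.enumerate_cons, PySem.List.enumerate_nil, List.foldl_cons, List.foldl_nil]
    set st := (PySem.List.enumerate (ls.take m)).foldl pvBStep (PySem.Dict.empty, none) with hst
    have hg : ls.getD m 0 = ls[m] := List.getD_eq_getElem ls 0 hm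
    constructor
    · simp only [pvBStep, zero_add, pvPQ, ih2, ih1, hg, Int.natCast_pos]
    · intro t
      simp only [pvBStep, zero_add, PySem.Dict.get?_insert, pvLastIdx?, ih1, hg]
      by_cases he : t = ls[m]
      · rw [if_pos he, if_pos he.symm]
      · rw [if_neg he, if_neg (fun h' => he h'.symm)]

theorem lastIdx_eq (ls : List Int) (t : Int) : ∀ m, (∃ j < m, ls.getD j 0 = t) →
    pvLastIdx? ls m t = some ((Nat.findGreatest (fun j => ls.getD j 0 = t) (m - 1) : Nat) : Int) := by
  intro m
  induction m with
  | zero => rintro ⟨j, hj, _⟩; omega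
  | succ m ih =>
    rintro ⟨j, hj, hPj⟩
    by_cases hP : ls.getD m 0 = t
    · simp only [pvLastIdx?, if_pos hP]
      have h1 : Nat.findGreatest (fun j => ls.getD j 0 = t) m = m := by
        have h2 := Nat.le_findGreatest (P := fun j => ls.getD j 0 = t) (le_refl m) hP
        have h3 := Nat.findGreatest_le (P := fun j => ls.getD j 0 = t) m
        omega
      rw [Nat.succ_sub_one, h1]
    · simp only [pvLastIdx?, if_neg hP]
      have hjm : j < m := by
        rcases Nat.lt_or_ge j m with h | h
        · exact h
        · have hjeq : j = m := by omega
          exact absurd (hjeq ▸ hPj) hP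
      rw [ih ⟨j, hjm, hPj⟩, Nat.succ_sub_one]
      cases m with
      | zero => omega
      | succ m' =>
        rw [Nat.findGreatest_succ, if_neg hP, Nat.succ_sub_one]

theorem pq_eq_none (ls : List Int) : ∀ m, (∀ i < m, 0 < i → ls.getD i 0 = 1) →
    pvPQ ls m = none := by
  intro m
  induction m with
  | zero => intro _; rfl
  | succ m ih =>
    intro h
    simp only [pvPQ]
    rw [if_neg, ih (fun i h1 h2 => h i (by omega) h2)]
    rintro ⟨h1, h2⟩
    exact h2 (h m (by omega) h1)

theorem pq_eq_some (ls : List Int) (k : Nat) (hk : 0 < k) (hne : ls.getD k 0 ≠ 1) :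
    ∀ m, k < m → (∀ i, k < i → i < m → ls.getD i 0 = 1) →
    pvPQ ls m = some ((k : Int), pvLastIdx? ls k (ls.getD k 0 - 1)) := by
  intro m
  induction m with
  | zero => intro h; omega
  | succ m ih =>
    intro hkm hones
    simp only [pvPQ]
    rcases Nat.lt_or_ge k m with h | h
    · rw [if_neg, ih h (fun i h1 h2 => hones i h1 (by omega))]
      rintro ⟨h1, h2⟩
      exact h2 (hones m h (by omega))
    · have : k = m := by omega
      subst this
      rw [if_pos ⟨hk, hne⟩]

theorem set_at_junction (l₁ l₂ t : List Int) (x y : Int) (i : Nat) (h : i = l₁.length + l₂.length) :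
    (l₁ ++ l₂ ++ (x :: t)).set i y = l₁ ++ (l₂ ++ [y]) ++ t := by
  rw [List.append_assoc, List.set_append, if_neg (by omega),
      List.set_append, if_neg (by omega)]
  have h2 : i - l₁.length - l₂.length = 0 := by omega
  rw [h2, List.set_cons_zero]
  simp [List.append_assoc]

theorem getElem_idx_congr (ls : List Int) (i j : Nat) (hij : i = j) (hj : j < ls.length) :
    ls[i]'(hij ▸ hj) = ls[j] := by subst hij; rfl

theorem fill_inv (ls : List Int) (p q : Nat) (hq : q < p) (hp : p < ls.length) :
    ∀ m : Nat, p ≤ m → m ≤ ls.length →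
    (PySem.List.pyRange (p : Int) (m : Int) 1).foldl
      (fun acc? i => match acc? with
        | none => none
        | some acc => match PySem.List.pyGet? acc (i - (p : Int) + (q : Int)) with
          | none => none
          | some v => PySem.List.pySet? acc i v) (some ls)
    = some (ls.take p ++ (List.range (m - p)).map (fun k => ls.getD (q + k % (p - q)) 0)
        ++ ls.drop m) := by
  intro m hpm
  induction m, hpm using Nat.le_induction with
  | base =>
    intro _
    rw [PySem.List.pyRange_one_eq_nil (le_refl _)]
    simp [List.take_append_drop]
  | succ m hm ih =>
    intro hmn
    have hcast : ((m + 1 : Nat) : Int) = (m : Int) + 1 := by push_cast; ring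
    rw [hcast, PySem.List.pyRange_one_succ_right (by exact_mod_cast hm), List.foldl_append,
        ih (by omega)]
    simp only [List.foldl_cons, List.foldl_nil]
    set g : Nat → Int := fun k => ls.getD (q + k % (p - q)) 0 with hg
    set A := ls.take p ++ (List.range (m - p)).map g ++ ls.drop m with hA
    have hlen : A.length = ls.length := by
      rw [hA]; simp [List.length_take, List.length_drop]; omega
    have hrcast : (m : Int) - ↑p + ↑q = ((m - (p - q) : Nat) : Int) := by omega
    set r := m - (p - q) with hr
    have hrn : r < A.length := by rw [hlen]; omega
    rw [hrcast, PySem.List.pyGet?_natCast, List.getElem?_eq_getElem hrn]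
    have hval : A[r]'hrn = g (m - p) := by
      have hlt : r < (ls.take p ++ (List.range (m - p)).map g).length := by
        simp [List.length_take]; omega
      have hrn' : r < (ls.take p ++ (List.range (m - p)).map g ++ ls.drop m).length := hrn
      show (ls.take p ++ (List.range (m - p)).map g ++ ls.drop m)[r]'hrn' = g (m - p)
      by_cases hrp : r < p
      · rw [List.getElem_append_left hlt, List.getElem_append_left (by simp [List.length_take]; omega)]
        rw [List.getElem_take, hg]
        have hmod : (m - p) % (p - q) = m - p := Nat.mod_eq_of_lt (by omega)
        simp only [hmod]
        rw [List.getD_eq_getElem _ _ (by omega : q + (m - p) < ls.length)]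
        exact (getElem_idx_congr ls r (q + (m - p)) (by omega) (by omega)).symm ▸ rfl
      · rw [List.getElem_append_left hlt,
            List.getElem_append_right (by simp [List.length_take]; omega : (ls.take p).length ≤ r)]
        rw [List.getElem_map, List.getElem_range, hg]
        have hlp : (ls.take p).length = p := by simp [List.length_take]; omega
        have harg : r - (ls.take p).length = (m - p) - (p - q) := by rw [hlp]; omega
        simp only [harg]
        have hmod : (m - p) % (p - q) = ((m - p) - (p - q)) % (p - q) := by
          conv_lhs => rw [show m - p = ((m - p) - (p - q)) + (p - q) by omega]
          rw [Nat.add_mod_right]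
        rw [hmod]
    have hred : (match some (A[r]'hrn) with
        | none => none
        | some v => PySem.List.pySet? A ((m : Nat) : Int) v) = PySem.List.pySet? A (m : Int) (A[r]'hrn) := rfl
    rw [hred, PySem.List.pySet?_natCast A m _ (by rw [hlen]; omega), hval]
    have hdrop : ls.drop m = ls[m]'(by omega) :: ls.drop (m + 1) := List.drop_eq_getElem_cons (by omega)
    conv_lhs => rw [hA, hdrop]
    rw [set_at_junction _ _ _ _ _ m (by simp [List.length_take]; omega)]
    rw [show m + 1 - p = (m - p) + 1 by omega, List.range_succ, List.map_append]
    simp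

-- B's comprehension equals A's filled list (both as a pure list), given 0 < q < p < n
theorem comp_eq_fill (ls : List Int) (p q : Nat) (hq : q < p) (hp : p < ls.length) :
    (PySem.List.pyRange 0 (ls.length : Int) 1).map
      (fun i => if i < (p : Int) then PySem.List.pyGetD ls i 0
                else PySem.List.pyGetD ls ((q : Int) + PySem.Int.mod (i - (p : Int)) ((p : Int) - (q : Int))) 0)
    = ls.take p ++ (List.range (ls.length - p)).map (fun k => ls.getD (q + k % (p - q)) 0)
        ++ ls.drop ls.length := by
  rw [List.drop_length, List.append_nil, PySem.List.pyRange_zero_natCast, List.map_map]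
  apply List.ext_getElem
  · simp [List.length_take]; omega
  · intro j h1 h2
    rw [List.getElem_map, List.getElem_range, Function.comp]
    have hjn : j < ls.length := by simpa using h1
    by_cases hjp : j < p
    · rw [if_pos (by exact_mod_cast hjp), PySem.List.pyGetD_natCast,
          List.getElem_append_left (by simp [List.length_take]; omega),
          List.getElem_take, List.getD_eq_getElem _ _ hjn]
    · rw [if_neg (by push_neg; exact_mod_cast Nat.le_of_not_lt hjp)]
      have hc1 : ((j : Nat) : Int) - (p : Int) = ((j - p : Nat) : Int) := by omega
      have hc2 : ((p : Int) - (q : Int)) = ((p - q : Nat) : Int) := by omega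
      rw [hc1, hc2, PySem.Int.mod_natCast]
      have hc3 : ((q : Int) + (((j - p) % (p - q) : Nat) : Int)) = ((q + (j - p) % (p - q) : Nat) : Int) := by
        push_cast; ring
      rw [hc3, PySem.List.pyGetD_natCast,
          List.getElem_append_right (by simp [List.length_take]; omega : (ls.take p).length ≤ j)]
      have hlp : (ls.take p).length = p := by simp [List.length_take]; omega
      rw [List.getElem_map, List.getElem_range]
      congr 1
      rw [hlp]

-- ===== VERDICT (by name: the statement is the Claim_ definition above) =====
theorem next_rooted_tree_spec : Claim_equal_next_rooted_tree := by
  unfold Claim_equal_next_rooted_tree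
  intro ls _dom hpre
  obtain ⟨hne, hP⟩ := hpre
  unfold Spec_next_rooted_tree
  have hn : 0 < ls.length := List.length_pos_of_ne_nil hne
  unfold next_rooted_tree next_rooted_tree_alt last_not_level_one
  obtain ⟨hpq, -⟩ := bfold_spec ls ls.length (le_refl _)
  rw [List.take_length] at hpq
  simp only [hpq]
  set k := pvLNLOLoop ls (ls.length - 1) with hk
  by_cases hk0 : k = 0
  · have hones : ∀ i < ls.length, 0 < i → ls.getD i 0 = 1 := by
      intro i h1 h2
      have := lnlo_ones ls (ls.length - 1) i (by omega) (by omega)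
      exact this
    rw [pq_eq_none ls ls.length hones]
    simp [hk0]
  · simp only [if_neg hk0]
    have hkle : k ≤ ls.length - 1 := lnlo_le ls (ls.length - 1)
    have hkne1 : ls.getD k 0 ≠ 1 := lnlo_ne_one ls (ls.length - 1) hk0
    have hones : ∀ j < ls.length, k < j → ls.getD j 0 = 1 := fun j hj1 hj2 =>
      lnlo_ones ls (ls.length - 1) j hj2 (by omega)
    obtain ⟨q0, hq0, hq0P⟩ := hP k (by omega) (by omega) hkne1 hones
    have hcast2 : ((k : Nat) : Int) - 1 = ((k - 1 : Nat) : Int) := by omega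
    have hLI := lastIdx_eq ls (ls.getD k 0 - 1) k ⟨q0, hq0, hq0P⟩
    simp only [pq_eq_some ls k (by omega) hkne1 ls.length (by omega)
        (fun i h1 h2 => hones i h2 h1), hLI, hcast2,
      qloop_eq ls (ls.getD k 0 - 1) (k - 1) (ls.length + k + 1) (by omega) (by omega)
        ⟨q0, by omega, hq0P⟩]
    set G := Nat.findGreatest (fun q => ls.getD q 0 = ls.getD k 0 - 1) (k - 1) with hG
    have hGk : G < k := by
      have := Nat.findGreatest_le (P := fun q => ls.getD q 0 = ls.getD k 0 - 1) (k - 1)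
      omega
    unfold pvFill
    rw [fill_inv ls k G hGk (by omega) ls.length (by omega) (le_refl _)]
    rw [← comp_eq_fill ls k G hGk (by omega)]
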